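-- pv_equiv track=rewrite | github.com/shivirity/hot-rolling-scheduling | test_best_sol.py | is_feasible_batch
-- ===== SOURCE A (Python) =====
-- import copy
--
-- MAX_SAME_WIDTH_LEN = 200000
--
-- MAX_BATCH_LEN = 800000
--
-- def is_feasible_batch(batches: list) -> bool:
--     """
--     某长序列是否合约束
--
--     :param batches: 长序列，不含有分隔符，且已按照宽度降序，格式为(df_id, width, length)
--     :return: True 表示该序列符合约束，否则为 False
--     """
--     batches = copy.deepcopy(batches)
--     l_sum_list = []
--     for batch in batches:
--         l_sum, c_width, width_sum = 0, None, 0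
--         for i in range(len(batch)):
--             l_sum += batch[i][2]
--             if batch[i][1] != c_width:
--                 c_width, width_sum = batch[i][1], batch[i][2]
--             else:
--                 width_sum += batch[i][2]
--                 if width_sum > MAX_SAME_WIDTH_LEN:
--                     return False
--         l_sum_list.append(l_sum)
--         if l_sum > MAX_BATCH_LEN:
--             return False
--     return True
-- ===== SOURCE B (Python) =====
-- MAX_SAME_WIDTH_LEN = 200000
--
-- MAX_BATCH_LEN = 800000
--
--
-- def _width_runs(batch):
--     """Group consecutive items of equal width; return their lists of lengths."""
--     runs = []
--     for _, width, length in batch: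
--         if runs and width == runs[-1][0]:
--             runs[-1][1].append(length)
--         else:
--             runs.append((width, [length]))
--     return [lengths for _, lengths in runs]
--
--
-- def is_feasible_batch(batches: list) -> bool:
--     for batch in batches:
--         if sum(it[2] for it in batch) > MAX_BATCH_LEN:
--             return False
--         for run in _width_runs(batch):
--             total = run[0]
--             for length in run[1:]:
--                 total += length
--                 if total > MAX_SAME_WIDTH_LEN:
--                     return False
--     return True
-- ===== Notes on version B (the rewrite author's own statement) =====
-- stated objective: idiomatic
-- what changed: Replaces A's flat stateful pass (c_width/width_sum/l_sum state machine with early returns) by a group-then-check decomposition: each batch is grouped into maximal consecutive-equal-width runs with a standard grouping loop, each run's running length total is checked from its second member on, and the batch total is checked separately.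
import Mathlib
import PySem

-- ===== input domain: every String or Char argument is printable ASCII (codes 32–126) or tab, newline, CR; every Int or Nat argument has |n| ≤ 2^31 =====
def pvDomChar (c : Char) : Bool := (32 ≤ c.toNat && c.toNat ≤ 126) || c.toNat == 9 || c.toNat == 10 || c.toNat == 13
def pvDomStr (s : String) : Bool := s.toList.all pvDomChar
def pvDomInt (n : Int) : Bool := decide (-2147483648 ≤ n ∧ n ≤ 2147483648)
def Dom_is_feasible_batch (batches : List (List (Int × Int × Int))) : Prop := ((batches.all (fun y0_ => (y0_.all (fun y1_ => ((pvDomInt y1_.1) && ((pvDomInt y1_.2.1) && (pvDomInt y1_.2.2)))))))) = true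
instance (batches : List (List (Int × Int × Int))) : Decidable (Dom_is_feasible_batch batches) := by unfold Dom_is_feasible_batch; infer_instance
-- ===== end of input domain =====

-- B replaces A's flat stateful pass by a group-into-width-runs-then-check decomposition (idiomatic; same cost).


def MAX_SAME_WIDTH_LEN : Int := 200000
def MAX_BATCH_LEN : Int := 800000

-- ===== PORT A =====
-- inner loop of A over one batch, carrying (l_sum, c_width, width_sum);
-- 'none' = the early 'return False', 'some l_sum' = loop finished.
def aInner : List (Int × Int × Int) → Int → Option Int → Int → Option Int
  | [], l_sum, _, _ => some l_sum
  | it :: rest, l_sum, c_width, width_sum =>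
    let l_sum := l_sum + it.2.2
    if some it.2.1 ≠ c_width then
      aInner rest l_sum (some it.2.1) it.2.2
    else
      let width_sum := width_sum + it.2.2
      if width_sum > MAX_SAME_WIDTH_LEN then none
      else aInner rest l_sum c_width width_sum

-- outer loop of A, carrying l_sum_list (appended to but otherwise unused, as in A).
def aOuter : List (List (Int × Int × Int)) → List Int → Bool
  | [], _ => true
  | batch :: rest, l_sum_list =>
    match aInner batch 0 none 0 with
    | none => false
    | some l_sum =>
      if l_sum > MAX_BATCH_LEN then false
      else aOuter rest (l_sum_list ++ [l_sum])

def is_feasible_batch (batches : List (List (Int × Int × Int))) : Bool :=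
  aOuter batches []

-- ===== PORT B =====
-- one step of _width_runs' grouping loop: extend the last run if widths match, else open a new one
def stepRun (runs : List (Int × List Int)) (it : Int × Int × Int) : List (Int × List Int) :=
  match runs.getLast? with
  | some last =>
    if it.2.1 = last.1 then runs.dropLast ++ [(last.1, last.2 ++ [it.2.2])]
    else runs ++ [(it.2.1, [it.2.2])]
  | none => runs ++ [(it.2.1, [it.2.2])]

-- _width_runs: group consecutive items of equal width; return their lists of lengths
def widthRuns (batch : List (Int × Int × Int)) : List (List Int) :=
  (batch.foldl stepRun []).map (·.2)

-- the inner 'for length in run[1:]' loop with its running total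
def runOk : Int → List Int → Bool
  | _, [] => true
  | s, x :: rest =>
    let s := s + x
    if s > MAX_SAME_WIDTH_LEN then false else runOk s rest

-- 'total = run[0]; for length in run[1:]: …' (a run produced by _width_runs is never empty)
def runOkL : List Int → Bool
  | [] => true
  | x :: rest => runOk x rest

def is_feasible_batch_alt (batches : List (List (Int × Int × Int))) : Bool :=
  batches.all (fun batch =>
    if (batch.map (fun it => it.2.2)).sum > MAX_BATCH_LEN then false
    else (widthRuns batch).all runOkL)

-- ===== PRECONDITION & SPEC =====
def Spec_is_feasible_batch (batches : List (List (Int × Int × Int))) (out : Bool) : Prop := out = is_feasible_batch_alt batches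
instance (batches : List (List (Int × Int × Int))) (out : Bool) : Decidable (Spec_is_feasible_batch batches out) := by unfold Spec_is_feasible_batch; infer_instance

-- ===== CLAIM (what is proved, stated in full; the proofs are below) =====
def Claim_equal_is_feasible_batch : Prop := ∀ (batches : List (List (Int × Int × Int))), Dom_is_feasible_batch batches → Spec_is_feasible_batch batches (is_feasible_batch batches)

-- ===== LEMMAS AND PROOFS =====

-- proof-side recursive view of the grouping: split the leading maximal run of width w
def splitRun (w : Int) : List (Int × Int × Int) → List Int × List (Int × Int × Int)
  | [] => ([], [])
  | it :: rest =>
    if it.2.1 = w then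
      let p := splitRun w rest
      (it.2.2 :: p.1, p.2)
    else ([], it :: rest)

theorem splitRun_len (w : Int) (items : List (Int × Int × Int)) :
    (splitRun w items).2.length ≤ items.length := by
  induction items with
  | nil => simp [splitRun]
  | cons it rest ih =>
    simp only [splitRun]
    split
    · simpa using Nat.le_succ_of_le ih
    · simp

-- proof-side recursive grouping into (width, lengths) pairs
def groupPairs : List (Int × Int × Int) → List (Int × List Int)
  | [] => []
  | x :: rest =>
    (x.2.1, x.2.2 :: (splitRun x.2.1 rest).1) :: groupPairs (splitRun x.2.1 rest).2
termination_by l => l.length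
decreasing_by exact Nat.lt_succ_of_le (splitRun_len _ _)

-- proof-side recursive grouping into lists of lengths (what widthRuns produces)
def runsB : List (Int × Int × Int) → List (List Int)
  | [] => []
  | x :: rest =>
    (x.2.2 :: (splitRun x.2.1 rest).1) :: runsB (splitRun x.2.1 rest).2
termination_by l => l.length
decreasing_by exact Nat.lt_succ_of_le (splitRun_len _ _)

theorem groupPairs_snd (items : List (Int × Int × Int)) :
    (groupPairs items).map (·.2) = runsB items := by
  induction items using runsB.induct with
  | case1 => simp [groupPairs, runsB]
  | case2 x rest ih => rw [groupPairs, runsB]; simp [ih]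

-- the grouping loop in mid-run state equals the recursive view
theorem foldl_stepRun (items : List (Int × Int × Int)) :
    ∀ (rs : List (Int × List Int)) (w : Int) (run : List Int),
      (items.foldl stepRun (rs ++ [(w, run)])) =
        rs ++ (w, run ++ (splitRun w items).1) :: groupPairs (splitRun w items).2 := by
  induction items with
  | nil => intro rs w run; simp [splitRun, groupPairs]
  | cons it rest ih =>
    intro rs w run
    rw [List.foldl_cons]
    by_cases hw : it.2.1 = w
    · have hstep : stepRun (rs ++ [(w, run)]) it = rs ++ [(w, run ++ [it.2.2])] := by
        simp [stepRun, hw]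
      rw [hstep, ih]
      simp [splitRun, hw]
    · have hstep : stepRun (rs ++ [(w, run)]) it =
          (rs ++ [(w, run)]) ++ [(it.2.1, [it.2.2])] := by
        simp [stepRun, hw]
      rw [hstep, ih (rs ++ [(w, run)]) it.2.1 [it.2.2]]
      simp only [splitRun, if_neg hw]
      rw [groupPairs]
      simp

theorem widthRuns_eq (batch : List (Int × Int × Int)) : widthRuns batch = runsB batch := by
  cases batch with
  | nil => simp [widthRuns, runsB]
  | cons x rest =>
    unfold widthRuns
    rw [List.foldl_cons]
    have h0 : stepRun [] x = [] ++ [(x.2.1, [x.2.2])] := by simp [stepRun]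
    rw [h0, foldl_stepRun]
    rw [runsB]
    simp [groupPairs_snd]

-- whenever aInner finishes, the returned l_sum is the initial one plus the batch's total length
theorem aInner_sum (items : List (Int × Int × Int)) :
    ∀ (s : Int) (cw : Option Int) (ws l : Int),
      aInner items s cw ws = some l → l = s + (items.map (fun it => it.2.2)).sum := by
  induction items with
  | nil => intro s cw ws l h; simp [aInner] at h; simp [h]
  | cons it rest ih =>
    intro s cw ws l h
    simp only [aInner] at h
    split at h
    · have := ih _ _ _ _ h
      simp [this]; ring
    · split at h
      · exact absurd h (by simp)
      · have := ih _ _ _ _ h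
        simp [this]; ring

-- the heart: A's inner loop in mid-run state (some w, ws) succeeds iff the rest of the
-- current run keeps the running sum within bound and all later runs are fine
theorem aInner_runs (n : Nat) : ∀ (items : List (Int × Int × Int)), items.length ≤ n →
    ∀ (s : Int) (w ws : Int),
      (aInner items s (some w) ws).isSome =
        (runOk ws (splitRun w items).1 && (runsB (splitRun w items).2).all runOkL) := by
  induction n with
  | zero =>
    intro items h s w ws
    have : items = [] := List.eq_nil_of_length_eq_zero (Nat.le_zero.mp h)
    subst this; simp [aInner, splitRun, runsB, runOk]
  | succ n ih =>
    intro items h s w ws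
    cases items with
    | nil => simp [aInner, splitRun, runsB, runOk]
    | cons it rest =>
      have hrest : rest.length ≤ n := by simpa using Nat.succ_le_succ_iff.mp h
      by_cases hw : it.2.1 = w
      · have hs : splitRun w (it :: rest) =
            (it.2.2 :: (splitRun w rest).1, (splitRun w rest).2) := by
          simp [splitRun, hw]
        simp only [aInner, hs]
        rw [if_neg (by simp [hw])]
        by_cases hbig : ws + it.2.2 > MAX_SAME_WIDTH_LEN
        · simp [runOk, hbig]
        · simp only [runOk, if_neg hbig]
          exact ih rest hrest (s + it.2.2) w (ws + it.2.2)
      · simp only [aInner, splitRun, if_neg hw]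
        rw [if_pos (by simp [Ne, hw])]
        have hnext :
            (runsB (it :: rest)).all runOkL =
              (runOk it.2.2 (splitRun it.2.1 rest).1 &&
                (runsB (splitRun it.2.1 rest).2).all runOkL) := by
          rw [runsB]
          simp [runOkL]
        rw [ih rest hrest _ it.2.1 it.2.2]
        simp [runOk, hnext]

-- at the start of a batch (c_width = None) the first item always opens a fresh run
theorem aInner_start (batch : List (Int × Int × Int)) (s : Int) :
    (aInner batch s none 0).isSome = (runsB batch).all runOkL := by
  cases batch with
  | nil => simp [aInner, runsB]
  | cons it rest =>
    simp only [aInner]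
    rw [if_pos (by simp)]
    rw [aInner_runs rest.length rest le_rfl _ it.2.1 it.2.2]
    rw [runsB]
    simp [runOkL]

-- one batch: A's pass over it agrees with B's grouped check
theorem batch_eq (batch : List (Int × Int × Int)) :
    (match aInner batch 0 none 0 with
      | none => false
      | some l => decide (¬ l > MAX_BATCH_LEN)) =
    (if (batch.map (fun it => it.2.2)).sum > MAX_BATCH_LEN then false
      else (widthRuns batch).all runOkL) := by
  rw [widthRuns_eq]
  cases hA : aInner batch 0 none 0 with
  | none =>
    have : (aInner batch 0 none 0).isSome = false := by simp [hA]
    rw [aInner_start] at this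
    simp [this]
  | some l =>
    have hsum := aInner_sum batch 0 none 0 l hA
    have hsome : (aInner batch 0 none 0).isSome = true := by simp [hA]
    rw [aInner_start] at hsome
    simp only [hsum, zero_add] at *
    by_cases hb : (batch.map (fun it => it.2.2)).sum > MAX_BATCH_LEN
    · simp [hb]
    · simp [hb, hsome]

-- the outer loops agree (l_sum_list never influences the result)
theorem outer_eq (batches : List (List (Int × Int × Int))) :
    ∀ acc, aOuter batches acc = is_feasible_batch_alt batches := by
  induction batches with
  | nil => intro acc; simp [aOuter, is_feasible_batch_alt]
  | cons b rest ih =>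
    intro acc
    simp only [aOuter, is_feasible_batch_alt, List.all_cons]
    have hb := batch_eq b
    cases hA : aInner b 0 none 0 with
    | none =>
      rw [hA] at hb
      simp only at hb
      rw [← hb]
      simp
    | some l =>
      rw [hA] at hb
      simp only at hb
      rw [← hb]
      by_cases hl : l > MAX_BATCH_LEN
      · simp [hl]
      · simp only [hl]
        rw [ih]
        simp [is_feasible_batch_alt]

-- ===== VERDICT (by name: the statement is the Claim_ definition above) =====
theorem is_feasible_batch_spec : Claim_equal_is_feasible_batch := by
  intro batches _
  unfold Spec_is_feasible_batch is_feasible_batch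
  exact outer_eq batches []
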